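-- pv_equiv track=rewrite | github.com/goplus/llgo | x/python/py/gen.py | ctogo
-- ===== SOURCE A (Python) =====
-- GO_KEYWORDS = {
--     "break", "default", "func", "interface", "select",
--     "case", "defer", "go", "map", "struct", "string",
--     "make", "new", "nil",
--     "chan", "else", "goto", "package", "switch",
--     "const", "fallthrough", "if", "range", "type",
--     "continue", "for", "import", "return", "var"
-- }
--
-- def capitalize_first(s):
--     return s[:1].upper() + s[1:] if s else s
--
-- def ctogo(name: str, capitalize: bool = True) -> str:
--     if name == "__llgo_va_list":
--         return name  # Keep __llgo_va_list unchanged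
--     if name.startswith("struct "):
--         name = name[7:].strip()
--     parts = name.split("_")
--     if capitalize:
--         result = "".join(capitalize_first(part) for part in parts)
--     else:
--         result = parts[0] + "".join(capitalize_first(part)
--                                     for part in parts[1:])
--     # Only remove "Py" if the name starts with it and is longer than 2 characters
--     if result.startswith("Py") and len(result) > 2:
--         result = result[2:]
--     # If the result is a Go keyword, add a suffix
--     if result.lower() in GO_KEYWORDS:
--         result += "_"
--     return result
-- ===== SOURCE B (Python) =====
-- GO_KEYWORDS = {
--     "break", "default", "func", "interface", "select",
--     "case", "defer", "go", "map", "struct", "string",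
--     "make", "new", "nil",
--     "chan", "else", "goto", "package", "switch",
--     "const", "fallthrough", "if", "range", "type",
--     "continue", "for", "import", "return", "var"
-- }
--
-- def ctogo(name: str, capitalize: bool = True) -> str:
--     if name == "__llgo_va_list":
--         return name  # Keep __llgo_va_list unchanged
--     if name.startswith("struct "):
--         name = name[7:].strip()
--     # One pass over the characters: '_' is dropped and arms the
--     # "uppercase the next char" flag; the flag starts armed iff capitalize.
--     out = []
--     up = capitalize
--     for ch in name:
--         if ch == '_':
--             up = True
--         elif up:
--             out.append(ch.upper())
--             up = False
--         else:
--             out.append(ch)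
--     result = ''.join(out)
--     if result.startswith("Py") and len(result) > 2:
--         result = result[2:]
--     if result.lower() in GO_KEYWORDS:
--         result += "_"
--     return result
-- ===== Notes on version B (the rewrite author's own statement) =====
-- stated objective: simpler
-- what changed: Replaced the underscore-split / capitalize-first-of-each-part / join pipeline with a single character-by-character scan that drops underscore characters and uppercases the next emitted character via a flag (armed initially iff capitalize); the prefix and Go-keyword guards are kept.
import Mathlib
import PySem

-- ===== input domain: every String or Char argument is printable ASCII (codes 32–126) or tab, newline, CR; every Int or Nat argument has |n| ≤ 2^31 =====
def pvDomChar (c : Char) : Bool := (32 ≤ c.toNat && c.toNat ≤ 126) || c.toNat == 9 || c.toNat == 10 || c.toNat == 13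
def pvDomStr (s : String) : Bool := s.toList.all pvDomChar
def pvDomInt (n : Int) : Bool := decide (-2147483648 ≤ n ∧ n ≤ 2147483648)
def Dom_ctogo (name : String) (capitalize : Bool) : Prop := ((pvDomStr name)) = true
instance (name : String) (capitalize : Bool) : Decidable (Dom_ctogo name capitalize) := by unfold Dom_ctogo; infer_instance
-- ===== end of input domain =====

-- B replaces A's underscore-split / capitalize_first / join pipeline by a single character
-- scan with an "uppercase the next char" flag (objective: simpler one-pass core).

-- ===== PORT A =====
def GO_KEYWORDS : PySem.Set String := PySem.Set.ofList [
  "break", "default", "func", "interface", "select",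
  "case", "defer", "go", "map", "struct", "string",
  "make", "new", "nil",
  "chan", "else", "goto", "package", "switch",
  "const", "fallthrough", "if", "range", "type",
  "continue", "for", "import", "return", "var"]

def capitalizeFirst (s : String) : String :=
  if s ≠ "" then PySem.Str.upper (PySem.Str.slice s none (some 1)) ++ PySem.Str.slice s (some 1) none
  else s

def ctogo (name : String) (capitalize : Bool) : String :=
  if name == "__llgo_va_list" then name  -- Keep __llgo_va_list unchanged
  else
    let name1 := if PySem.Str.startswith name "struct "
                 then PySem.Str.strip (PySem.Str.slice name (some 7) none) else name
    let parts := (PySem.Str.split? name1 "_").getD []   -- sep ≠ "", always some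
    let result := if capitalize then PySem.Str.join "" (parts.map capitalizeFirst)
                  else (PySem.List.pyGet? parts 0).getD ""   -- split() is never empty, index 0 always hits
                       ++ PySem.Str.join "" ((PySem.List.slice parts (some 1) none).map capitalizeFirst)
    let result2 := if PySem.Str.startswith result "Py" && decide (PySem.Str.len result > 2)
                   then PySem.Str.slice result (some 2) none else result
    if PySem.Set.contains GO_KEYWORDS (PySem.Str.lower result2) then result2 ++ "_" else result2

-- ===== PORT B =====
def ctogo_alt (name : String) (capitalize : Bool) : String :=
  if name == "__llgo_va_list" then name  -- Keep __llgo_va_list unchanged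
  else
    let name1 := if PySem.Str.startswith name "struct "
                 then PySem.Str.strip (PySem.Str.slice name (some 7) none) else name
    -- for ch in name: '_' arms the flag; otherwise emit (uppercased iff flag armed)
    let st := name1.toList.foldl
      (fun (acc : List Char × Bool) ch =>
        if ch == '_' then (acc.1, true)
        else if acc.2 then (acc.1 ++ [PySem.Chars.upperChar ch], false)
        else (acc.1 ++ [ch], false))
      ([], capitalize)
    let result := String.ofList st.1
    let result2 := if PySem.Str.startswith result "Py" && decide (PySem.Str.len result > 2)
                   then PySem.Str.slice result (some 2) none else result
    if PySem.Set.contains GO_KEYWORDS (PySem.Str.lower result2) then result2 ++ "_" else result2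

-- ===== PRECONDITION & SPEC =====
def Spec_ctogo (name : String) (capitalize : Bool) (out : String) : Prop := out = ctogo_alt name capitalize
instance (name : String) (capitalize : Bool) (out : String) : Decidable (Spec_ctogo name capitalize out) := by unfold Spec_ctogo; infer_instance

-- ===== CLAIM (what is proved, stated in full; the proofs are below) =====
def Claim_equal_ctogo : Prop := ∀ (name : String) (capitalize : Bool), Dom_ctogo name capitalize → Spec_ctogo name capitalize (ctogo name capitalize)

-- ===== LEMMAS AND PROOFS =====

-- clean recursive form of name.split('_') (accumulating the current piece)
def mySplit (pre : List Char) : List Char → List (List Char)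
  | [] => [pre]
  | c :: rest => if c = '_' then pre :: mySplit [] rest else mySplit (pre ++ [c]) rest

-- B's scan, in recursive form
def scanB : List Char → Bool → List Char
  | [], _ => []
  | c :: rest, up =>
      if c = '_' then scanB rest true
      else (if up then PySem.Chars.upperChar c else c) :: scanB rest false

def capFirstL : List Char → List Char
  | [] => []
  | c :: rest => PySem.Chars.upperChar c :: rest

lemma splitOn_go_eq (l : List Char) : ∀ (fuel : Nat) (cur : List Char) (acc : List (List Char)),
    l.length < fuel →
    PySem.Chars.splitOn.go ['_'] fuel l cur acc = acc.reverse ++ mySplit cur.reverse l := by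
  induction l with
  | nil =>
      intro fuel cur acc h
      match fuel with
      | fuel + 1 => simp [PySem.Chars.splitOn.go, mySplit]
  | cons c rest ih =>
      intro fuel cur acc h
      match fuel with
      | fuel + 1 =>
        by_cases hc : c = '_'
        · subst hc
          rw [show PySem.Chars.splitOn.go ['_'] (fuel + 1) ('_' :: rest) cur acc
                = PySem.Chars.splitOn.go ['_'] fuel rest [] (cur.reverse :: acc) from by
                simp [PySem.Chars.splitOn.go, List.isPrefixOf]]
          rw [ih fuel [] (cur.reverse :: acc) (by simpa using h)]
          simp [mySplit]
        · rw [show PySem.Chars.splitOn.go ['_'] (fuel + 1) (c :: rest) cur acc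
                = PySem.Chars.splitOn.go ['_'] fuel rest (c :: cur) acc from by
                simp [PySem.Chars.splitOn.go, List.isPrefixOf]
                intro h; exact absurd h.symm hc]
          rw [ih fuel (c :: cur) acc (by simpa using h)]
          simp [mySplit, hc]

lemma splitOn_eq_mySplit (cs : List Char) :
    PySem.Chars.splitOn cs ['_'] = mySplit [] cs := by
  unfold PySem.Chars.splitOn
  rw [splitOn_go_eq cs (cs.length + 1) [] [] (by omega)]
  simp

lemma mySplit_shift (cs : List Char) : ∀ pre : List Char,
    mySplit pre cs = (pre ++ (mySplit [] cs).headI) :: (mySplit [] cs).tail := by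
  induction cs with
  | nil => intro pre; simp [mySplit]
  | cons c rest ih =>
      intro pre
      by_cases hc : c = '_'
      · subst hc; simp [mySplit]
      · simp only [mySplit, if_neg hc, List.nil_append]
        rw [ih (pre ++ [c]), ih [c]]
        simp

lemma join_nil_cons (p : List Char) (rest : List (List Char)) :
    PySem.Chars.join [] (p :: rest) = p ++ PySem.Chars.join [] rest := by
  cases rest with
  | nil => simp [PySem.Chars.join_singleton, PySem.Chars.join_nil]
  | cons q r => rw [PySem.Chars.join_cons_cons]; simp

-- the heart: A's pieces-based result equals B's scan, for both values of the flag
lemma core_both (cs : List Char) :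
    (PySem.Chars.join [] ((mySplit [] cs).map capFirstL) = scanB cs true) ∧
    ((mySplit [] cs).headI ++ PySem.Chars.join [] (((mySplit [] cs).tail).map capFirstL)
        = scanB cs false) := by
  induction cs with
  | nil => simp [mySplit, scanB, capFirstL, PySem.Chars.join_singleton]
  | cons c rest ih =>
      by_cases hc : c = '_'
      · subst hc
        refine ⟨?_, ?_⟩
        · simpa [mySplit, scanB, capFirstL, join_nil_cons] using ih.1
        · simpa [mySplit, scanB] using ih.1
      · have hshift := mySplit_shift rest [c]
        refine ⟨?_, ?_⟩
        · simp only [mySplit, if_neg hc, List.nil_append]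
          rw [hshift]
          simp only [List.map_cons, join_nil_cons, List.singleton_append, capFirstL]
          rw [scanB]
          simp only [if_neg hc, List.cons_append]
          exact congrArg _ ih.2
        · simp only [mySplit, if_neg hc, List.nil_append]
          rw [hshift]
          simp only [List.headI_cons, List.tail_cons, List.singleton_append]
          rw [scanB]
          simp only [if_neg hc]
          exact congrArg _ ih.2

-- B's foldl accumulates scanB
lemma foldl_scan (cs : List Char) : ∀ (out : List Char) (up : Bool),
    (cs.foldl
      (fun (acc : List Char × Bool) ch =>
        if ch == '_' then (acc.1, true)
        else if acc.2 then (acc.1 ++ [PySem.Chars.upperChar ch], false)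
        else (acc.1 ++ [ch], false))
      (out, up)).1 = out ++ scanB cs up := by
  induction cs with
  | nil => intro out up; simp [scanB]
  | cons c rest ih =>
      intro out up
      simp only [List.foldl_cons]
      by_cases hc : c = '_'
      · subst hc
        rw [if_pos (by simp), ih, scanB, if_pos rfl]
      · rw [if_neg (by simp [hc])]
        cases up with
        | true =>
            rw [if_pos rfl, ih, scanB]
            simp [hc]
        | false =>
            rw [if_neg (by simp), ih, scanB]
            simp [hc]

lemma capitalizeFirst_toList (s : String) :
    (capitalizeFirst s).toList = capFirstL s.toList := by
  unfold capitalizeFirst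
  by_cases h : s = ""
  · subst h; simp [capFirstL]
  · rw [if_pos h]
    have hs : s.toList ≠ [] := by
      intro hnil
      exact h (by rw [← String.toList_inj] at *; simpa using hnil)
    obtain ⟨c, rest, hcr⟩ := List.exists_cons_of_ne_nil hs
    simp only [String.toList_append, PySem.Str.toList_upper, PySem.Str.toList_slice]
    rw [PySem.Chars.slice_eq_listSlice, PySem.Chars.slice_eq_listSlice,
        PySem.List.slice_to _ (by norm_num : (0:Int) ≤ 1),
        PySem.List.slice_from _ (by norm_num : (0:Int) ≤ 1)]
    rw [hcr]
    simp [PySem.Chars.upper, capFirstL]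

-- A's whole "result" computation equals B's, as strings
lemma result_eq (s : String) (cap : Bool) :
    (if cap then PySem.Str.join "" (((PySem.Str.split? s "_").getD []).map capitalizeFirst)
     else (PySem.List.pyGet? ((PySem.Str.split? s "_").getD []) 0).getD ""
          ++ PySem.Str.join "" ((PySem.List.slice ((PySem.Str.split? s "_").getD []) (some 1) none).map capitalizeFirst))
    = String.ofList (s.toList.foldl
        (fun (acc : List Char × Bool) ch =>
          if ch == '_' then (acc.1, true)
          else if acc.2 then (acc.1 ++ [PySem.Chars.upperChar ch], false)
          else (acc.1 ++ [ch], false))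
        ([], cap)).1 := by
  rw [foldl_scan s.toList [] cap]
  have hsplit : Option.map (fun x => List.map String.toList x) (PySem.Str.split? s "_")
      = PySem.Chars.split? s.toList "_".toList := PySem.Str.split?_map s "_"
  have hchars : PySem.Chars.split? s.toList "_".toList = some (mySplit [] s.toList) := by
    unfold PySem.Chars.split?
    rw [if_neg (by simp)]
    rw [show ("_".toList) = ['_'] from rfl, splitOn_eq_mySplit]
  rw [hchars] at hsplit
  obtain ⟨parts, hps, hmap⟩ : ∃ parts, PySem.Str.split? s "_" = some parts ∧
      parts.map String.toList = mySplit [] s.toList := by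
    cases hp : PySem.Str.split? s "_" with
    | none => rw [hp] at hsplit; simp at hsplit
    | some parts => rw [hp] at hsplit; exact ⟨parts, rfl, by simpa using hsplit⟩
  rw [hps]
  have hne : parts ≠ [] := by
    intro h; subst h
    have := mySplit_shift s.toList []
    rw [← hmap] at this; simp at this
  obtain ⟨p, ps, hpp⟩ := List.exists_cons_of_ne_nil hne
  subst hpp
  apply String.toList_inj.mp
  cases cap with
  | true =>
      show (PySem.Str.join "" ((p :: ps).map capitalizeFirst)).toList
          = (String.ofList ([] ++ scanB s.toList true)).toList
      simp only [PySem.Str.toList_join, List.map_map, List.nil_append]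
      have hcf : List.map (String.toList ∘ capitalizeFirst) (p :: ps)
          = List.map capFirstL ((p :: ps).map String.toList) := by
        simp only [List.map_map]
        exact List.map_congr_left (fun x _ => capitalizeFirst_toList x)
      rw [show String.toList "" = [] from rfl, hcf, hmap]
      simpa using (core_both s.toList).1
  | false =>
      show ((PySem.List.pyGet? (p :: ps) (0:Int)).getD ""
            ++ PySem.Str.join "" ((PySem.List.slice (p :: ps) (some 1) none).map capitalizeFirst)).toList
          = (String.ofList ([] ++ scanB s.toList false)).toList
      simp only [String.toList_append, PySem.Str.toList_join, List.nil_append]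
      rw [PySem.List.slice_from _ (by norm_num : (0:Int) ≤ 1)]
      have h0 : (PySem.List.pyGet? (p :: ps) (0 : Int)).getD "" = p := by
        simp [PySem.List.pyGet?, PySem.List.pyIdx?]
      rw [h0]
      have hcf : List.map String.toList (List.map capitalizeFirst (List.drop (Int.toNat 1) (p :: ps)))
          = List.map capFirstL (ps.map String.toList) := by
        simp only [Int.toNat_one, List.drop_one, List.tail_cons, List.map_map]
        exact List.map_congr_left (fun x _ => capitalizeFirst_toList x)
      rw [hcf]
      have hhead : p.toList = (mySplit [] s.toList).headI := by
        have := congrArg List.headI hmap; simpa using this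
      have htail : ps.map String.toList = (mySplit [] s.toList).tail := by
        have := congrArg List.tail hmap; simpa using this
      rw [hhead, htail]
      simpa using (core_both s.toList).2

-- ===== VERDICT (by name: the statement is the Claim_ definition above) =====
theorem ctogo_spec : Claim_equal_ctogo := by
  intro name capitalize _
  unfold Spec_ctogo
  by_cases hg : (name == "__llgo_va_list") = true
  · simp only [ctogo, ctogo_alt, if_pos hg]
  · simp only [ctogo, ctogo_alt, if_neg hg]
    rw [result_eq]
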